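-- pv_equiv track=rewrite | github.com/ziglang/zig | rpython/tool/algo/bitstring.py | make_bitstring
-- ===== SOURCE A (Python) =====
-- def make_bitstring(lst):
--     "NOT_RPYTHON"
--     if not lst:
--         return ''
--     num_bits = max(lst) + 1
--     num_bytes = (num_bits + 7) // 8
--     entries = [0] * num_bytes
--     for x in lst:
--         assert x >= 0
--         entries[x >> 3] |= 1 << (x & 7)
--     return ''.join(map(chr, entries))
-- ===== SOURCE B (Python) =====
-- def make_bitstring(lst):
--     "NOT_RPYTHON"
--     if not lst:
--         return ''
--     xs = sorted(lst)
--     assert xs[0] >= 0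
--     pieces = []
--     cur_byte = 0
--     cur_val = 0
--     for x in xs:
--         b = x >> 3
--         if b != cur_byte:
--             pieces.append(chr(cur_val) + '\x00' * (b - cur_byte - 1))
--             cur_byte = b
--             cur_val = 0
--         cur_val |= 1 << (x & 7)
--     pieces.append(chr(cur_val))
--     return ''.join(pieces)
-- ===== Notes on version B (the rewrite author's own statement) =====
-- stated objective: alternative
-- what changed: Replaced A's scatter of each index into a preallocated byte array with a sort-then-scan: sort the indices, walk them once emitting completed bytes (and runs of zero bytes for gaps) in output order, so the result string is built sequentially with no random-access writes.
import Mathlib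
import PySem

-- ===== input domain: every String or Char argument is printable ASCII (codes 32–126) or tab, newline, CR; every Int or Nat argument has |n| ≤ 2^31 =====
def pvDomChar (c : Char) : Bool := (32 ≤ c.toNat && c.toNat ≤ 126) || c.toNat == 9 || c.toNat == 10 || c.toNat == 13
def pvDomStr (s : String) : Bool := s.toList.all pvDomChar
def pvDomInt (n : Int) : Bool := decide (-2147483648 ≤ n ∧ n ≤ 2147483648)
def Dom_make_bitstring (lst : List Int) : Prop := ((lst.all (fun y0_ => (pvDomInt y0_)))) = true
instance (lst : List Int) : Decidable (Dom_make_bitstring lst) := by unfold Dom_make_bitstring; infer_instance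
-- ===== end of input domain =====

-- B sorts the indices and emits the output bytes sequentially in one scan (gap bytes as
-- zero runs), instead of A's scatter writes into a preallocated array (objective: alternative).

-- shared transliterations of Python's 'x >> 3' and '1 << (x & 7)'
def pvByte (x : Int) : Int := x >>> (3 : Nat)
def pvBit (x : Int) : Int := (1 : Int) <<< (PySem.Int.band x 7).toNat

-- ===== PORT A =====
def make_bitstring (lst : List Int) : String :=
  if lst = [] then "" else
    let num_bits := (PySem.List.max? lst (fun y => y)).getD 0 + 1
    let num_bytes := PySem.Int.floordiv (num_bits + 7) 8
    let entries : List Int := List.replicate num_bytes.toNat 0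
    let entries := lst.foldl
      (fun e x => e.set (pvByte x).toNat (PySem.Int.bor (e.getD (pvByte x).toNat 0) (pvBit x)))
      entries
    String.ofList (entries.map (fun v => Char.ofNat v.toNat))

-- ===== PORT B =====
-- loop body of B: state = (flattened pieces, cur_byte, cur_val)
def pvStep (s : List Char × Int × Int) (x : Int) : List Char × Int × Int :=
  let b := pvByte x
  if b ≠ s.2.1 then
    (s.1 ++ (Char.ofNat s.2.2.toNat :: List.replicate (b - s.2.1 - 1).toNat (Char.ofNat 0)),
     b, PySem.Int.bor 0 (pvBit x))
  else (s.1, s.2.1, PySem.Int.bor s.2.2 (pvBit x))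

def make_bitstring_alt (lst : List Int) : String :=
  if lst = [] then "" else
    let xs := PySem.List.sorted lst (fun y => y) false
    -- B's 'assert xs[0] >= 0' always passes under Pre_make_bitstring
    let st := xs.foldl pvStep ([], 0, 0)
    String.ofList (st.1 ++ [Char.ofNat st.2.2.toNat])

-- ===== PRECONDITION & SPEC =====
-- Pre_ excludes lists with a negative element, on which Python A (and B) raises AssertionError.
def Pre_make_bitstring (lst : List Int) : Prop := ∀ x ∈ lst, 0 ≤ x
instance (lst : List Int) : Decidable (Pre_make_bitstring lst) := by
  unfold Pre_make_bitstring; infer_instance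
def pvWitness_make_bitstring : List Int := [0, 3, 9, 3]

def Spec_make_bitstring (lst : List Int) (out : String) : Prop := out = make_bitstring_alt lst
instance (lst : List Int) (out : String) : Decidable (Spec_make_bitstring lst out) := by
  unfold Spec_make_bitstring; infer_instance

-- ===== CLAIM (what is proved, stated in full; the proofs are below) =====
def Claim_equal_make_bitstring : Prop :=
  ∀ (lst : List Int), Dom_make_bitstring lst → Pre_make_bitstring lst →
    Spec_make_bitstring lst (make_bitstring lst)

-- ===== LEMMAS AND PROOFS =====

-- the common per-byte value: bits of l landing in byte i, OR'd onto a0 in list order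
def pvRef (l : List Int) (i : Int) (a0 : Int) : Int :=
  l.foldl (fun a x => if pvByte x = i then PySem.Int.bor a (pvBit x) else a) a0

-- last byte index reached by ys (cb if ys is empty)
def pvBmax (ys : List Int) (cb : Int) : Int :=
  match ys.getLast? with
  | some l => pvByte l
  | none => cb

-- the bytes emitted by B's scan starting at byte cb with partial value cv
def pvEmit (ys : List Int) (cb cv : Int) : List Char :=
  (List.range ((pvBmax ys cb - cb).toNat + 1)).map
    (fun (k : Nat) => Char.ofNat (pvRef ys (cb + (k : Int)) (if k = 0 then cv else 0)).toNat)

theorem pvByte_eq_div (x : Int) : pvByte x = x / 8 := by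
  simpa using Int.shiftRight_eq_div_pow x 3

theorem pvByte_mono {x y : Int} (h : x ≤ y) : pvByte x ≤ pvByte y := by
  rw [pvByte_eq_div, pvByte_eq_div]; exact Int.ediv_le_ediv (by norm_num) h

theorem pvBit_nonneg (x : Int) : 0 ≤ pvBit x := by
  unfold pvBit; rw [Int.shiftLeft_eq]; positivity

theorem pvBor_zero_left (a : Int) : PySem.Int.bor 0 a = a := by
  rw [PySem.Int.bor_comm]; simp

theorem pvBor_assoc {a b c : Int} (ha : 0 ≤ a) (hb : 0 ≤ b) (hc : 0 ≤ c) :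
    PySem.Int.bor (PySem.Int.bor a b) c = PySem.Int.bor a (PySem.Int.bor b c) := by
  rw [PySem.Int.bor_of_nonneg ha hb, PySem.Int.bor_of_nonneg hb hc,
    PySem.Int.bor_of_nonneg (by positivity) hc, PySem.Int.bor_of_nonneg ha (by positivity)]
  simp [Nat.lor_assoc]

theorem pvRef_perm {l l' : List Int} (hp : l.Perm l') (i : Int) {a : Int} (ha : 0 ≤ a) :
    pvRef l i a = pvRef l' i a := by
  induction hp generalizing a with
  | nil => rfl
  | cons x _ ih =>
    unfold pvRef
    rw [List.foldl_cons, List.foldl_cons]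
    have : 0 ≤ (if pvByte x = i then PySem.Int.bor a (pvBit x) else a) := by
      split_ifs with h
      · rw [PySem.Int.bor_of_nonneg ha (pvBit_nonneg x)]; positivity
      · exact ha
    exact ih this
  | swap x y l =>
    unfold pvRef
    rw [List.foldl_cons, List.foldl_cons, List.foldl_cons, List.foldl_cons]
    congr 1
    split_ifs with h1 h2 h2 <;> try rfl
    rw [pvBor_assoc ha (pvBit_nonneg y) (pvBit_nonneg x),
      pvBor_assoc ha (pvBit_nonneg x) (pvBit_nonneg y),
      PySem.Int.bor_comm (pvBit y) (pvBit x)]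
  | trans h1 _ ih1 ih2 => rw [ih1 ha, ih2 ha]

theorem pvRef_no_hit {l : List Int} {i : Int} (h : ∀ y ∈ l, pvByte y ≠ i) (a : Int) :
    pvRef l i a = a := by
  induction l generalizing a with
  | nil => rfl
  | cons x t ih =>
    unfold pvRef
    rw [List.foldl_cons, if_neg (h x (by simp))]
    exact ih (fun y hy => h y (by simp [hy])) a

theorem pvRef_cons (x : Int) (t : List Int) (i a : Int) :
    pvRef (x :: t) i a = pvRef t i (if pvByte x = i then PySem.Int.bor a (pvBit x) else a) := by
  unfold pvRef; rw [List.foldl_cons]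

theorem pvBmax_cons (x : Int) (t : List Int) (cb : Int) :
    pvBmax (x :: t) cb = pvBmax t (pvByte x) := by
  cases t with
  | nil => rfl
  | cons y s =>
    unfold pvBmax
    rw [List.getLast?_cons_cons, List.getLast?_eq_some_getLast (by simp : (y :: s) ≠ [])]

theorem pvBmax_ge {ys : List Int} {cb : Int} (h : ∀ y ∈ ys, cb ≤ pvByte y) :
    cb ≤ pvBmax ys cb := by
  cases hys : ys.getLast? with
  | none => simp [pvBmax, hys]
  | some l =>
    have : l ∈ ys := List.mem_of_getLast? hys
    simpa [pvBmax, hys] using h l this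

theorem pairwise_le_getLast : ∀ (l : List Int) (h : l ≠ []) (_ : l.Pairwise (· ≤ ·))
    (y : Int), y ∈ l → y ≤ l.getLast h
  | [x], _, _, y, hy => by simp_all
  | x :: z :: s, _, hp, y, hy => by
    rw [List.getLast_cons (by simp)]
    rcases List.mem_cons.mp hy with rfl | hy'
    · exact le_trans (List.rel_of_pairwise_cons hp (by simp))
        (pairwise_le_getLast (z :: s) (by simp) hp.of_cons z (by simp))
    · exact pairwise_le_getLast (z :: s) (by simp) hp.of_cons y hy'

-- pvEmit unfolding lemmas for B's two loop cases
theorem pvEmit_cons_eq (x : Int) (t : List Int) (cb cv : Int) (h : pvByte x = cb) :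
    pvEmit (x :: t) cb cv = pvEmit t cb (PySem.Int.bor cv (pvBit x)) := by
  simp only [pvEmit, pvBmax_cons, h]
  apply List.map_congr_left
  intro k _
  rw [pvRef_cons]
  rcases Nat.eq_zero_or_pos k with rfl | hk
  · simp [h]
  · have hk0 : ¬(k = 0) := Nat.pos_iff_ne_zero.mp hk
    have hne : ¬(pvByte x = cb + (k : Int)) := by rw [h]; omega
    rw [if_neg hk0, if_neg hk0, if_neg hne]

theorem pvEmit_cons_ne (x : Int) (t : List Int) (cb cv : Int) (hlt : cb < pvByte x)
    (hbx : ∀ y ∈ t, pvByte x ≤ pvByte y) :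
    pvEmit (x :: t) cb cv =
      (Char.ofNat cv.toNat :: List.replicate (pvByte x - cb - 1).toNat (Char.ofNat 0))
        ++ pvEmit t (pvByte x) (pvBit x) := by
  have hno : ∀ y ∈ x :: t, pvByte y ≠ cb := by
    intro y hy
    rcases List.mem_cons.mp hy with rfl | hy'
    · omega
    · have := hbx y hy'; omega
  have hbm : pvByte x ≤ pvBmax t (pvByte x) := pvBmax_ge hbx
  simp only [pvEmit, pvBmax_cons]
  set b := pvByte x with hb
  set d := (b - cb).toNat with hdd
  have hn : (pvBmax t b - cb).toNat + 1 = d + ((pvBmax t b - b).toNat + 1) := by omega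
  rw [hn, List.range_add, List.map_append, List.map_map]
  congr 1
  · -- the first d output bytes: chr cv then the zero gap
    have hd : d = (b - cb - 1).toNat + 1 := by omega
    rw [hd, List.range_succ_eq_map, List.map_cons, List.map_map]
    congr 1
    · simp [pvRef_no_hit hno]
    · apply List.eq_replicate_iff.mpr
      refine ⟨by simp, ?_⟩
      intro c hc
      simp only [List.mem_map, List.mem_range, Function.comp_apply] at hc
      obtain ⟨k, hk, hck⟩ := hc
      have hno' : ∀ y ∈ x :: t, pvByte y ≠ cb + ((k.succ : Nat) : Int) := by
        intro y hy
        rcases List.mem_cons.mp hy with rfl | hy'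
        · push_cast; omega
        · have := hbx y hy'; push_cast; omega
      rw [← hck, if_neg (by simp), pvRef_no_hit hno']
      rfl
  · -- the remaining bytes: pvEmit t b (pvBit x)
    apply List.map_congr_left
    intro k _
    simp only [Function.comp_apply]
    have hidx : cb + ((d + k : Nat) : Int) = b + (k : Int) := by push_cast; omega
    rw [hidx, if_neg (by omega), pvRef_cons]
    rcases Nat.eq_zero_or_pos k with rfl | hk
    · simp [← hb, pvBor_zero_left]
    · have hk0 : ¬(k = 0) := Nat.pos_iff_ne_zero.mp hk
      have hne : ¬(pvByte x = b + (k : Int)) := by rw [← hb]; omega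
      rw [if_neg hne, if_neg hk0]

-- B's scan, continued from state (out, cb, cv) over a sorted tail ys all of whose bytes
-- are ≥ cb, appends exactly the per-byte reference values from byte cb to the last byte.
theorem scan_emit : ∀ (ys : List Int) (out : List Char) (cb cv : Int),
    ys.Pairwise (· ≤ ·) → (∀ y ∈ ys, cb ≤ pvByte y) →
    ((ys.foldl pvStep (out, cb, cv)).1 ++ [Char.ofNat (ys.foldl pvStep (out, cb, cv)).2.2.toNat])
      = out ++ pvEmit ys cb cv := by
  intro ys
  induction ys with
  | nil =>
    intro out cb cv _ _
    simp [pvEmit, pvBmax, pvRef, List.range_succ]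
  | cons x t ih =>
    intro out cb cv hpair hbytes
    have hx : ∀ y ∈ t, x ≤ y := fun y hy => List.rel_of_pairwise_cons hpair hy
    have hbx : ∀ y ∈ t, pvByte x ≤ pvByte y := fun y hy => pvByte_mono (hx y hy)
    have hcbx : cb ≤ pvByte x := hbytes x (by simp)
    rw [List.foldl_cons]
    by_cases h : pvByte x = cb
    · -- same byte: just accumulate cv
      have hstep : pvStep (out, cb, cv) x = (out, cb, PySem.Int.bor cv (pvBit x)) := by
        simp [pvStep, h]
      rw [hstep, ih out cb _ hpair.of_cons (fun y hy => h ▸ hbx y hy),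
        pvEmit_cons_eq x t cb cv h]
    · -- new byte: flush chr cv and the zero gap
      have hlt : cb < pvByte x := lt_of_le_of_ne hcbx (Ne.symm h)
      have hstep : pvStep (out, cb, cv) x =
          (out ++ (Char.ofNat cv.toNat :: List.replicate (pvByte x - cb - 1).toNat (Char.ofNat 0)),
           pvByte x, PySem.Int.bor 0 (pvBit x)) := by
        simp [pvStep, h]
      rw [hstep, ih _ _ _ hpair.of_cons hbx, pvBor_zero_left, List.append_assoc,
        pvEmit_cons_ne x t cb cv hlt hbx]

-- A-side: the fold over the preallocated array, pointwise
theorem foldA_len (l : List Int) (e : List Int) :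
    (l.foldl (fun e x => e.set (pvByte x).toNat (PySem.Int.bor (e.getD (pvByte x).toNat 0) (pvBit x))) e).length
      = e.length := by
  induction l generalizing e with
  | nil => rfl
  | cons x t ih => rw [List.foldl_cons, ih, List.length_set]

theorem getD_set_of_lt (e : List Int) (j : Nat) (v : Int) (i : Nat) (hi : i < e.length) :
    (e.set j v).getD i 0 = if j = i then v else e.getD i 0 := by
  rw [List.getD_eq_getElem?_getD, List.getElem?_set, List.getD_eq_getElem?_getD]
  split_ifs with h1 h2 <;> simp_all

theorem foldA_getD (l : List Int) (e : List Int)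
    (hl : ∀ x ∈ l, 0 ≤ x ∧ (pvByte x).toNat < e.length) (i : Nat) (hi : i < e.length) :
    (l.foldl (fun e x => e.set (pvByte x).toNat (PySem.Int.bor (e.getD (pvByte x).toNat 0) (pvBit x))) e).getD i 0
      = pvRef l (i : Int) (e.getD i 0) := by
  induction l generalizing e with
  | nil => rfl
  | cons x t ih =>
    obtain ⟨hx0, hxlt⟩ := hl x (by simp)
    simp only [List.foldl_cons, pvRef]
    rw [ih _ (fun y hy => by simpa [List.length_set] using hl y (by simp [hy]))
        (by simpa [List.length_set] using hi)]
    unfold pvRef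
    congr 1
    rw [getD_set_of_lt e _ _ i hi]
    by_cases h : pvByte x = (i : Int)
    · have hb0 : 0 ≤ pvByte x := by
        rw [pvByte_eq_div]; exact Int.ediv_nonneg hx0 (by norm_num)
      have hn : (pvByte x).toNat = i := by omega
      rw [hn, if_pos rfl, if_pos h]
    · have hn : ¬((pvByte x).toNat = i) := by
        intro hc
        rw [pvByte_eq_div] at h hc
        have : 0 ≤ x / 8 := Int.ediv_nonneg hx0 (by norm_num)
        omega
      rw [if_neg hn, if_neg h]

-- ===== VERDICT (by name: the statement is the Claim_ definition above) =====
theorem make_bitstring_spec : Claim_equal_make_bitstring := by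
  intro lst _ hpre
  unfold Spec_make_bitstring make_bitstring make_bitstring_alt
  by_cases hnil : lst = []
  · simp [hnil]
  · simp only [if_neg hnil]
    obtain ⟨m, hm⟩ : ∃ m, PySem.List.max? lst (fun y => y) = some m := by
      rcases Option.eq_none_or_eq_some (PySem.List.max? lst (fun y => y)) with h | h
      · exact absurd ((PySem.List.max?_eq_none_iff lst (fun y => y)).mp h) hnil
      · exact h
    have hmem : m ∈ lst := PySem.List.max?_mem hm
    have hmax : ∀ y ∈ lst, y ≤ m := PySem.List.max?_isMax hm
    have hm0 : 0 ≤ m := hpre m hmem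
    set xs := PySem.List.sorted lst (fun y => y) false with hxs
    have hperm : xs.Perm lst := PySem.List.sorted_perm lst (fun y => y) false
    have hxsne : xs ≠ [] := by
      intro hc
      exact hnil ((PySem.List.sorted_eq_nil_iff _ _ _).mp hc)
    have hpair : xs.Pairwise (· ≤ ·) := by
      simpa using PySem.List.sorted_pairwise lst (fun y => y)
    -- the last element of xs is the maximum m
    have hlast_mem : xs.getLast hxsne ∈ lst := hperm.mem_iff.mp (List.getLast_mem hxsne)
    have hlast : xs.getLast hxsne = m :=
      le_antisymm (hmax _ hlast_mem)
        (pairwise_le_getLast xs hxsne hpair m (hperm.mem_iff.mpr hmem))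
    have hbytes0 : ∀ y ∈ xs, (0 : Int) ≤ pvByte y := by
      intro y hy
      rw [pvByte_eq_div]
      exact Int.ediv_nonneg (hpre y (hperm.mem_iff.mp hy)) (by norm_num)
    have hscan := scan_emit xs [] 0 0 hpair hbytes0
    rw [List.nil_append] at hscan
    rw [hscan]
    congr 1
    -- A's byte list equals pvEmit xs 0 0
    rw [hm]
    simp only [Option.getD_some]
    have hnum : PySem.Int.floordiv (m + 1 + 7) 8 = m / 8 + 1 := by
      rw [PySem.Int.floordiv_eq_ediv_of_pos (by norm_num)]; omega
    rw [hnum]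
    have hbm : pvBmax xs 0 = m / 8 := by
      unfold pvBmax
      rw [List.getLast?_eq_some_getLast hxsne, hlast]
      exact pvByte_eq_div m
    have hdiv0 : 0 ≤ m / 8 := Int.ediv_nonneg hm0 (by norm_num)
    have hNn : (m / 8 + 1).toNat = (m / 8).toNat + 1 := by omega
    have hbound : ∀ x ∈ lst, 0 ≤ x ∧ (pvByte x).toNat < (m / 8 + 1).toNat := by
      intro x hx
      have h0 := hpre x hx
      have hle := hmax x hx
      have hbx : pvByte x = x / 8 := pvByte_eq_div x
      refine ⟨h0, ?_⟩
      have : x / 8 ≤ m / 8 := Int.ediv_le_ediv (by norm_num) hle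
      omega
    unfold pvEmit
    rw [hbm]
    apply List.ext_getElem
    · rw [List.length_map, List.length_map, foldA_len, List.length_replicate,
        List.length_range]
      omega
    · intro k h1 h2
      have hk : k < (m / 8).toNat + 1 := by
        rw [List.length_map, List.length_range] at h2; omega
      rw [List.getElem_map, List.getElem_map, List.getElem_range]
      have hA := foldA_getD lst (List.replicate (m / 8 + 1).toNat 0)
        (by simpa using hbound) k (by simp; omega)
      rw [List.getD_eq_getElem?_getD,
        List.getElem?_eq_getElem (by rw [foldA_len, List.length_replicate]; omega),
        Option.getD_some, List.getD_eq_getElem?_getD,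
        List.getElem?_eq_getElem (by simp; omega), Option.getD_some,
        List.getElem_replicate] at hA
      rw [hA]
      congr 1
      have : pvRef xs ((k : Int)) (if k = 0 then 0 else 0) = pvRef xs (k : Int) 0 := by
        split_ifs <;> rfl
      rw [show ((0 : Int) + (k : Int)) = (k : Int) by ring, this]
      exact congrArg Int.toNat (pvRef_perm hperm (k : Int) le_rfl).symm
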